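-- pv_equiv track=rewrite | github.com/JaneLi99/Leetcode_Practice | Min_Num_of_Glasses.py | solution
-- ===== SOURCE A (Python) =====
-- def solution(N, K):
--     glass_list = [i for i in range(N, 0, -1)]
--
--     if K > sum(glass_list):
--         return -1
--
--     res = 0
--     while K > 0:
--         if K in glass_list:
--             return 1
--
--         for j in glass_list:
--             if K >= j:
--                 K -= j
--                 res += 1
--     return res
-- ===== SOURCE B (Python) =====
-- def solution(N, K):
--     # O(log N): closed-form feasibility checks, then binary search for the
--     # minimal number m of distinct glasses 1..N whose top-m sum reaches K.
--     if K <= 0: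
--         return 0
--     total = N * (N + 1) // 2 if N > 0 else 0
--     if K > total:
--         return -1
--     if K <= N:
--         return 1
--     lo, hi = 2, N
--     while lo < hi:
--         mid = (lo + hi) // 2
--         if mid * (2 * N + 1 - mid) // 2 >= K:
--             hi = mid
--         else:
--             lo = mid + 1
--     return lo
-- ===== Notes on version B (the rewrite author's own statement) =====
-- stated objective: faster
-- what changed: Replaces building the list [N..1] and greedily subtracting glass sizes in a pass with closed-form feasibility checks plus a binary search for the minimal m whose top-m glass sum N+(N-1)+...+(N-m+1) reaches K.
import Mathlib
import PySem

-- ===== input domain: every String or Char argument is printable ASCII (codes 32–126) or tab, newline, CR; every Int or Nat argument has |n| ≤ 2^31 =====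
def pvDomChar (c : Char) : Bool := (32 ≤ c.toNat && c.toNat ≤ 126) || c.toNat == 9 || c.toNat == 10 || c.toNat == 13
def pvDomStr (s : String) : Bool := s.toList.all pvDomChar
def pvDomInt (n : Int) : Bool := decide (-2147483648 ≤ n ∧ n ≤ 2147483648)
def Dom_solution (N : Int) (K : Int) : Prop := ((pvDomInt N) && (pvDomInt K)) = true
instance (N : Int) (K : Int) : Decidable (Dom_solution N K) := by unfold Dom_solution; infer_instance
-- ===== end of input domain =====

-- B replaces A's list construction and greedy subtraction pass by closed-form checks
-- plus a binary search for the count (objective: faster, O(log N) vs O(N)).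

-- ===== PORT A =====
-- the `while K > 0` loop of A; fuel bounds the number of iterations (each executed
-- iteration with a nonempty glass list strictly decreases K, so K.toNat + 1 suffices
-- on every input where the Python loop terminates)
def pvWhile (glass : List Int) : Nat → Int → Int → Int
  | 0, _, res => res
  | fuel + 1, K, res =>
    if 0 < K then
      if K ∈ glass then 1
      else
        let s := glass.foldl (fun (s : Int × Int) j => if j ≤ s.1 then (s.1 - j, s.2 + 1) else s) (K, res)
        pvWhile glass fuel s.1 s.2
    else res

-- glass_list = [i for i in range(N, 0, -1)] = [N, N-1, …, 1]; built as a map over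
-- List.range (provably equal to PySem.List.pyRange N 0 (-1), see pvGlass_eq below)
def solution (N : Int) (K : Int) : Int :=
  let glass := (List.range N.toNat).map (fun k => N - (k : Int))
  if glass.foldl (· + ·) 0 < K then -1
  else pvWhile glass (K.toNat + 1) K 0

-- ===== PORT B =====
-- B's `while lo < hi` binary-search loop; fuel = initial interval width (shrinks by ≥ 1 each step)
def pvSearch (N K : Int) : Nat → Int → Int → Int
  | 0, lo, _ => lo
  | fuel + 1, lo, hi =>
    if lo < hi then
      let mid := PySem.Int.floordiv (lo + hi) 2
      if K ≤ PySem.Int.floordiv (mid * (2 * N + 1 - mid)) 2 then pvSearch N K fuel lo mid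
      else pvSearch N K fuel (mid + 1) hi
    else lo

def solution_alt (N : Int) (K : Int) : Int :=
  if K ≤ 0 then 0
  else
    let total : Int := if 0 < N then PySem.Int.floordiv (N * (N + 1)) 2 else 0
    if total < K then -1
    else if K ≤ N then 1
    else pvSearch N K (N - 2).toNat 2 N

-- ===== PRECONDITION & SPEC =====
def Spec_solution (N : Int) (K : Int) (out : Int) : Prop := out = solution_alt N K
instance (N : Int) (K : Int) (out : Int) : Decidable (Spec_solution N K out) := by unfold Spec_solution; infer_instance

-- ===== CLAIM (what is proved, stated in full; the proofs are below) =====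
def Claim_equal_solution : Prop := ∀ (N : Int) (K : Int), Dom_solution N K → Spec_solution N K (solution N K)

-- ===== LEMMAS AND PROOFS =====

lemma pvGlass_eq (N : Int) :
    (List.range N.toNat).map (fun k => N - (k : Int)) = PySem.List.pyRange N 0 (-1) := by
  rw [PySem.List.pyRange_neg_one]
  norm_num
  induction List.range N.toNat with
  | nil => rfl
  | cons x xs ih => simp [ih]

-- G N m = twice the sum of the m largest glasses N, N-1, …, N-m+1
def Gf (N m : Int) : Int := m * (2 * N + 1 - m)

lemma fdiv_two (a c : Int) (h : a = 2 * c) : PySem.Int.floordiv a 2 = c := by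
  rw [PySem.Int.floordiv_eq_iff_of_pos (by norm_num)]
  omega

lemma Gf_even (N m : Int) : ∃ c, Gf N m = 2 * c := by
  rcases Int.even_or_odd m with ⟨k, hk⟩ | ⟨k, hk⟩
  · exact ⟨k * (2 * N + 1 - m), by unfold Gf; rw [hk]; ring⟩
  · exact ⟨m * (N - k), by unfold Gf; rw [hk]; ring⟩

lemma le_fdivG (N m K : Int) : K ≤ PySem.Int.floordiv (m * (2 * N + 1 - m)) 2 ↔ 2 * K ≤ Gf N m := by
  obtain ⟨c, hc⟩ := Gf_even N m
  have hc' : m * (2 * N + 1 - m) = 2 * c := hc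
  rw [fdiv_two _ _ hc', hc]
  omega

lemma Gf_mono {N a b : Int} (_ha : 0 ≤ a) (hab : a < b) (hb : b ≤ N) : Gf N a < Gf N b := by
  have h : Gf N b - Gf N a = (b - a) * (2 * N + 1 - a - b) := by unfold Gf; ring
  nlinarith [h]

lemma sum_glass (n : Nat) : 2 * (PySem.List.pyRange (n : Int) 0 (-1)).sum = (n : Int) * ((n : Int) + 1) := by
  induction n with
  | zero => simp [PySem.List.pyRange_neg_one_eq_nil]
  | succ k ih =>
    rw [PySem.List.pyRange_neg_one_cons (by exact_mod_cast Nat.succ_pos k)]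
    push_cast
    push_cast at ih
    simp only [List.sum_cons]
    have : ((k : Int) + 1) - 1 = (k : Int) := by ring
    rw [this]
    nlinarith [ih]

lemma pass_nonpos (l : List Int) (hl : ∀ x ∈ l, 0 < x) (c r : Int) (hc : c ≤ 0) :
    l.foldl (fun (s : Int × Int) j => if j ≤ s.1 then (s.1 - j, s.2 + 1) else s) (c, r) = (c, r) := by
  induction l with
  | nil => rfl
  | cons x xs ih =>
    have hx : 0 < x := hl x (by simp)
    simp only [List.foldl_cons]
    rw [if_neg (by omega)]
    exact ih (fun y hy => hl y (by simp [hy]))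

-- the greedy pass over [N, N-1, …, 1]: starting from K with G N (m-1) < 2K ≤ G N m,
-- it ends at 0 having used exactly m glasses
lemma pass_greedy (n : Nat) : ∀ K res m : Int, 1 ≤ m → m ≤ (n : Int) →
    Gf (n : Int) (m - 1) < 2 * K → 2 * K ≤ Gf (n : Int) m →
    (PySem.List.pyRange (n : Int) 0 (-1)).foldl
      (fun (s : Int × Int) j => if j ≤ s.1 then (s.1 - j, s.2 + 1) else s) (K, res) = (0, res + m) := by
  induction n with
  | zero => intro K res m h1 h2 _ _; omega
  | succ k ih =>
    intro K res m h1 h2 hlo hhi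
    set N : Int := ((k + 1 : Nat) : Int) with hN
    have hN1 : N = (k : Int) + 1 := by push_cast [hN]; ring
    have hNpos : (0 : Int) < N := by omega
    rw [PySem.List.pyRange_neg_one_cons hNpos]
    simp only [List.foldl_cons]
    have hKpos : 1 ≤ K := by
      have h0 : 0 ≤ Gf N (m - 1) := by
        unfold Gf; nlinarith
      omega
    by_cases hK : N ≤ K
    · rw [if_pos hK]
      by_cases hz : K - N ≤ 0
      · -- K = N, one glass suffices; m must be 1
        have hm1 : m = 1 := by
          by_contra hm
          have h2m : 2 ≤ m := by omega
          have : Gf N 1 ≤ Gf N (m - 1) := by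
            rcases eq_or_lt_of_le (show (1 : Int) ≤ m - 1 by omega) with h | h
            · rw [← h]
            · exact le_of_lt (Gf_mono (by omega) h (by omega))
          have hG1 : Gf N 1 = 2 * N := by unfold Gf; ring
          omega
        have hKN : K = N := by omega
        have hrest : PySem.List.pyRange (N - 1) 0 (-1) = PySem.List.pyRange ((k : Nat) : Int) 0 (-1) := by
          rw [hN1]; norm_num
        rw [hrest]
        rw [pass_nonpos _ (fun x hx => (PySem.List.mem_pyRange_neg_one.mp hx).1) _ _ (by omega)]
        rw [hm1, hKN]
        simp
      · -- K > N: use glass N and recurse on the rest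
        have hm2 : 2 ≤ m := by
          by_contra hm
          have hm1 : m = 1 := by omega
          have hG1 : Gf N 1 = 2 * N := by unfold Gf; ring
          rw [hm1] at hhi
          omega
        have hrest : PySem.List.pyRange (N - 1) 0 (-1) = PySem.List.pyRange ((k : Nat) : Int) 0 (-1) := by
          rw [hN1]; norm_num
        rw [hrest]
        have e1 : Gf (k : Int) (m - 1 - 1) = Gf N (m - 1) - 2 * N := by
          unfold Gf; rw [hN1]; ring
        have e2 : Gf (k : Int) (m - 1) = Gf N m - 2 * N := by
          unfold Gf; rw [hN1]; ring
        have := ih (K - N) (res + 1) (m - 1) (by omega) (by omega)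
          (by rw [e1]; omega) (by rw [e2]; omega)
        rw [this]
        congr 1
        ring
    · rw [if_neg (by omega)]
      -- K < N: m must be 1 and the rest of the pass uses exactly one glass (= K)
      have hm1 : m = 1 := by
        by_contra hm
        have h2m : 2 ≤ m := by omega
        have : Gf N 1 ≤ Gf N (m - 1) := by
          rcases eq_or_lt_of_le (show (1 : Int) ≤ m - 1 by omega) with h | h
          · rw [← h]
          · exact le_of_lt (Gf_mono (by omega) h (by omega))
        have hG1 : Gf N 1 = 2 * N := by unfold Gf; ring
        omega
      have hk1 : 1 ≤ (k : Int) := by omega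
      have hrest : PySem.List.pyRange (N - 1) 0 (-1) = PySem.List.pyRange ((k : Nat) : Int) 0 (-1) := by
        rw [hN1]; norm_num
      rw [hrest]
      have := ih K res 1 (by omega) hk1
        (by unfold Gf; omega)
        (by unfold Gf; omega)
      rw [this, hm1]

-- the binary search returns some r with G N (r-1) < 2K ≤ G N r, 1 ≤ r ≤ N
lemma search_char (N K : Int) : ∀ fuel : Nat, ∀ lo hi : Int, lo ≤ hi → hi - lo ≤ (fuel : Int) →
    1 ≤ lo → hi ≤ N → Gf N (lo - 1) < 2 * K → 2 * K ≤ Gf N hi →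
    1 ≤ pvSearch N K fuel lo hi ∧ pvSearch N K fuel lo hi ≤ N ∧
      Gf N (pvSearch N K fuel lo hi - 1) < 2 * K ∧ 2 * K ≤ Gf N (pvSearch N K fuel lo hi) := by
  intro fuel
  induction fuel with
  | zero =>
    intro lo hi hle hfuel h1 hN hlo hhi
    have : lo = hi := by omega
    subst this
    simp only [pvSearch]
    exact ⟨h1, hN, hlo, hhi⟩
  | succ f ih =>
    intro lo hi hle hfuel h1 hN hlo hhi
    simp only [pvSearch]
    by_cases hlt : lo < hi
    · rw [if_pos hlt]
      set mid := PySem.Int.floordiv (lo + hi) 2 with hmid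
      have hb := PySem.Int.floordiv_two_mid_bounds hle
      have hmlt : mid < hi := by
        rw [hmid, PySem.Int.floordiv_lt_iff_lt_mul (by norm_num)]
        omega
      by_cases hc : K ≤ PySem.Int.floordiv (mid * (2 * N + 1 - mid)) 2
      · rw [if_pos hc]
        have hG : 2 * K ≤ Gf N mid := (le_fdivG N mid K).mp hc
        exact ih lo mid (by omega) (by omega) h1 (by omega) hlo hG
      · rw [if_neg hc]
        have hG : ¬ 2 * K ≤ Gf N mid := fun h => hc ((le_fdivG N mid K).mpr h)
        have : Gf N (mid + 1 - 1) < 2 * K := by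
          have : mid + 1 - 1 = mid := by ring
          rw [this]; omega
        exact ih (mid + 1) hi (by omega) (by omega) (by omega) hN this hhi
    · rw [if_neg hlt]
      have : lo = hi := by omega
      subst this
      exact ⟨h1, hN, hlo, hhi⟩

lemma twoK_le_GNN_of_le_total {N K : Int} (_hNpos : 0 < N)
    (h : K ≤ PySem.Int.floordiv (N * (N + 1)) 2) : 2 * K ≤ Gf N N := by
  have e : N * (N + 1) = N * (2 * N + 1 - N) := by ring
  rw [e] at h
  exact (le_fdivG N N K).mp h

lemma GNN_eq (N : Int) : Gf N N = N * (N + 1) := by unfold Gf; ring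

-- ===== VERDICT (by name: the statement is the Claim_ definition above) =====
theorem solution_spec : Claim_equal_solution := by
  intro N K _
  unfold Spec_solution
  simp only [solution, solution_alt]
  rw [pvGlass_eq, ← List.sum_eq_foldl]
  have hsum_pos : (0 : Int) ≤ (PySem.List.pyRange N 0 (-1)).sum :=
    List.sum_nonneg fun x hx => le_of_lt (PySem.List.mem_pyRange_neg_one.mp hx).1
  by_cases hK0 : K ≤ 0
  · rw [if_neg (by omega), if_pos hK0]
    simp only [pvWhile]
    rw [if_neg (by omega)]
  · rw [if_neg hK0]
    by_cases hN0 : 0 < N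
    · have hNn : N = (N.toNat : Int) := by omega
      have hsum2 : 2 * (PySem.List.pyRange N 0 (-1)).sum = N * (N + 1) := by
        rw [hNn]; exact_mod_cast sum_glass N.toNat
      rw [if_pos hN0]
      by_cases htot : PySem.Int.floordiv (N * (N + 1)) 2 < K
      · -- infeasible: both return -1
        have h2K : N * (N + 1) < 2 * K := by
          have e : N * (N + 1) = N * (2 * N + 1 - N) := by ring
          rw [e] at htot
          have hnot : ¬ (K ≤ PySem.Int.floordiv (N * (2 * N + 1 - N)) 2) := by omega
          have := (not_congr (le_fdivG N N K)).mp hnot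
          rw [GNN_eq] at this
          omega
        rw [if_pos (by omega), if_pos htot]
      · rw [if_neg htot]
        have h2K : 2 * K ≤ N * (N + 1) := by
          have := twoK_le_GNN_of_le_total hN0
            (show K ≤ PySem.Int.floordiv (N * (N + 1)) 2 by omega)
          rw [GNN_eq] at this
          exact this
        rw [if_neg (by omega)]
        by_cases hKN : K ≤ N
        · -- one glass: K ∈ [N..1]
          rw [if_pos hKN]
          simp only [pvWhile]
          rw [if_pos (by omega),
            if_pos (PySem.List.mem_pyRange_neg_one.mpr ⟨by omega, hKN⟩)]
        · rw [if_neg hKN]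
          have hN2 : 2 ≤ N := by
            rcases (by omega : N = 1 ∨ 2 ≤ N) with h | h
            · subst h; omega
            · exact h
          have hchar := search_char N K (N - 2).toNat 2 N (by omega) (by omega)
            (by norm_num) le_rfl
            (by unfold Gf; norm_num; omega)
            (by rw [GNN_eq]; omega)
          set r := pvSearch N K (N - 2).toNat 2 N with hr
          obtain ⟨hr1, hrN, hrlo, hrhi⟩ := hchar
          simp only [pvWhile]
          rw [if_pos (by omega),
            if_neg (by rw [PySem.List.mem_pyRange_neg_one]; omega)]
          have hpass := pass_greedy N.toNat K 0 r (by omega) (by omega)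
            (by rw [← hNn]; exact hrlo) (by rw [← hNn]; exact hrhi)
          rw [← hNn] at hpass
          rw [hpass]
          obtain ⟨k', hk'⟩ : ∃ k', K.toNat = k' + 1 := ⟨K.toNat - 1, by omega⟩
          rw [hk']
          simp only [pvWhile]
          rw [if_neg (by omega)]
          omega
    · -- N ≤ 0: glass list empty, total 0, both return -1
      rw [PySem.List.pyRange_neg_one_eq_nil (by omega), if_neg hN0]
      simp only [List.sum_nil]
      rw [if_pos (by omega), if_pos (by omega)]
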